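-- pv_equiv track=rewrite | github.com/YuvaNithesh/MY_LEETCODE | 0828-count-unique-characters-of-all-substrings-of-a-given-string/0828-count-unique-characters-of-all-substrings-of-a-given-string.py | uniqueLetterString
-- ===== SOURCE A (Python) =====
-- def uniqueLetterString(s: str) -> int:
--     index = {c: [-1, -1] for c in set(s)}
--     result = 0
--
--     for i, ch in enumerate(s):
--         prev, last = index[ch]
--
--         result += (last - prev) * (i - last)
--
--         index[ch] = [last, i]
--
--     n = len(s)
--
--     for ch in index:
--         prev, last = index[ch]
--         result += (last - prev) * (n - last)
--
--     return result
-- ===== SOURCE B (Python) =====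
-- def uniqueLetterString(s: str) -> int:
--     positions = {}
--     for i, ch in enumerate(s):
--         positions.setdefault(ch, []).append(i)
--     n = len(s)
--     total = 0
--     for ps in positions.values():
--         prev = -1
--         for p, nxt in zip(ps, ps[1:] + [n]):
--             total += (p - prev) * (nxt - p)
--             prev = p
--     return total
-- ===== Notes on version B (the rewrite author's own statement) =====
-- stated objective: alternative
-- what changed: B replaces A's single rolling pass (a dict of [second-last,last] pairs updated per character plus a final flush loop) by first building the complete list of occurrence indices per character and then summing (p-prev)*(next-p) per occurrence in a grouped second phase.
import Mathlib
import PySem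

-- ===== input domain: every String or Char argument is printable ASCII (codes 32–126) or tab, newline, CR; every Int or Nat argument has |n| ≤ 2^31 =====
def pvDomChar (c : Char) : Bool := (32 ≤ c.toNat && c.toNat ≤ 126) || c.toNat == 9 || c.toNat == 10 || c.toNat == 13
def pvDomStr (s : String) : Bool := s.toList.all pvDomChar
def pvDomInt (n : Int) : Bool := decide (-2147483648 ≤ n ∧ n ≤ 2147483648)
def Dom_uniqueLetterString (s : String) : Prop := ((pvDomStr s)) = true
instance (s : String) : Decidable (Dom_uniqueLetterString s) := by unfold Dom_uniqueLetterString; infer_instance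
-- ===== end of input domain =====

-- B groups the work per character (dict of full occurrence-index lists, then one grouped
-- summing pass) instead of A's rolling [second-last,last] pairs; same O(n) cost ("alternative").

-- ===== PORT A =====
def pvStepA (st : PySem.Dict Char (List Int) × Int) (p : Int × Char) :
    PySem.Dict Char (List Int) × Int :=
  match PySem.Dict.getD st.1 p.2 [-1, -1] with
  | prev :: last :: _ =>
      (PySem.Dict.insert st.1 p.2 [last, p.1], st.2 + (last - prev) * (p.1 - last))
  | _ => st

def uniqueLetterString (s : String) : Int :=
  let cs := s.toList
  let index0 : PySem.Dict Char (List Int) :=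
    (PySem.Set.ofList cs).foldl (fun d c => PySem.Dict.insert d c [-1, -1]) PySem.Dict.empty
  let st := (PySem.List.enumerate cs).foldl pvStepA (index0, 0)
  (PySem.Dict.items st.1).foldl
    (fun r kv =>
      match kv.2 with
      | prev :: last :: _ => r + (last - prev) * ((cs.length : Int) - last)
      | _ => r)
    st.2

-- ===== PORT B =====
def pvStepB (d : PySem.Dict Char (List Int)) (p : Int × Char) : PySem.Dict Char (List Int) :=
  PySem.Dict.modify d p.2 [] (fun ps => ps ++ [p.1])

def pvChainB (n : Int) (total : Int) (ps : List Int) : Int :=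
  ((ps.zip (ps.drop 1 ++ [n])).foldl
    (fun tp q => (tp.1 + (q.1 - tp.2) * (q.2 - q.1), q.1)) (total, -1)).1

def uniqueLetterString_alt (s : String) : Int :=
  let cs := s.toList
  let positions := (PySem.List.enumerate cs).foldl pvStepB PySem.Dict.empty
  let n : Int := cs.length
  (PySem.Dict.values positions).foldl (fun total ps => pvChainB n total ps) 0

-- ===== PRECONDITION & SPEC =====
def Spec_uniqueLetterString (s : String) (out : Int) : Prop := out = uniqueLetterString_alt s
instance (s : String) (out : Int) : Decidable (Spec_uniqueLetterString s out) := by unfold Spec_uniqueLetterString; infer_instance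

-- ===== CLAIM (what is proved, stated in full; the proofs are below) =====
def Claim_equal_uniqueLetterString : Prop := ∀ (s : String), Dom_uniqueLetterString s → Spec_uniqueLetterString s (uniqueLetterString s)

-- ===== LEMMAS AND PROOFS =====

-- (prev,last) bookkeeping abstracted as a function Char → Int × Int
def pfUpd (f : Char → Int × Int) (d : Char) (i : Int) : Char → Int × Int :=
  fun c => if c = d then ((f d).2, i) else f c

def pfExt (f : Char → Int × Int) : List Char → Int → Char → Int × Int
  | [], _, c => f c
  | d :: ts, i, c => pfExt (pfUpd f d i) ts (i + 1) c

def rdel (f : Char → Int × Int) : List Char → Int → Int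
  | [], _ => 0
  | d :: ts, i => ((f d).2 - (f d).1) * (i - (f d).2) + rdel (pfUpd f d i) ts (i + 1)

def PF (cs : List Char) (c : Char) : Int × Int := pfExt (fun _ => (-1, -1)) cs 0 c

def Wgt (cs : List Char) (c : Char) : Int :=
  ((PF cs c).2 - (PF cs c).1) * ((cs.length : Int) - (PF cs c).2)

def occ (cs : List Char) (c : Char) : List Int :=
  ((((PySem.List.enumerate cs).map Prod.swap).filter (fun q => q.1 == c)).map (·.2))

def chain (prev : Int) : List Int → Int → Int
  | [], _ => 0
  | [p], n => (p - prev) * (n - p)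
  | p :: q :: t, n => (p - prev) * (q - p) + chain p (q :: t) n

def pe (ab : Int × Int) (qs : List Int) : Int × Int := qs.foldl (fun ab q => (ab.2, q)) ab

theorem loopA_spec (ts : List Char) :
    ∀ (f : Char → Int × Int) (d : PySem.Dict Char (List Int)) (r i : Int),
    (∀ c, PySem.Dict.getD d c [-1, -1] = [(f c).1, (f c).2]) →
    (∀ c, PySem.Dict.getD ((PySem.List.enumerate ts i).foldl pvStepA (d, r)).1 c [-1, -1]
        = [(pfExt f ts i c).1, (pfExt f ts i c).2]) ∧
    ((PySem.List.enumerate ts i).foldl pvStepA (d, r)).2 = r + rdel f ts i := by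
  induction ts with
  | nil =>
      intro f d r i h
      simp only [PySem.List.enumerate, List.foldl_nil]
      exact ⟨fun c => h c, by simp [rdel]⟩
  | cons ch ts ih =>
      intro f d r i h
      rw [PySem.List.enumerate_cons]
      simp only [List.foldl_cons]
      have hstep : pvStepA (d, r) (i, ch)
          = (PySem.Dict.insert d ch [(f ch).2, i],
             r + ((f ch).2 - (f ch).1) * (i - (f ch).2)) := by
        simp [pvStepA, h ch]
      rw [hstep]
      have h' : ∀ c, PySem.Dict.getD (PySem.Dict.insert d ch [(f ch).2, i]) c [-1, -1]
          = [(pfUpd f ch i c).1, (pfUpd f ch i c).2] := by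
        intro c
        by_cases hc : c = ch
        · subst hc; simp [PySem.Dict.getD_insert_self, pfUpd]
        · simp [PySem.Dict.getD_insert, pfUpd, hc, h c]
      have hrec := ih (pfUpd f ch i) (PySem.Dict.insert d ch [(f ch).2, i]) (r + ((f ch).2 - (f ch).1) * (i - (f ch).2)) (i + 1) h'
      refine ⟨fun c => ?_, ?_⟩
      · simpa [pfExt] using hrec.1 c
      · have := hrec.2
        simp only [rdel] at this ⊢
        omega

theorem getD_init (L : List Char) :
    ∀ d, (∀ c, PySem.Dict.getD d c [-1, -1] = [-1, -1]) →
    ∀ c, PySem.Dict.getD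
        (L.foldl (fun d c => PySem.Dict.insert d c [-1, -1]) d) c [-1, -1] = [-1, -1] := by
  induction L with
  | nil => intro d h c; simpa using h c
  | cons x L ih =>
      intro d h c
      simp only [List.foldl_cons]
      refine ih _ (fun c' => ?_) c
      by_cases hc : c' = x
      · subst hc; simp [PySem.Dict.getD_insert_self]
      · simp [PySem.Dict.getD_insert, hc, h c']

theorem set_update_of_subset (xs : List Char) :
    ∀ s : PySem.Set Char, (∀ x ∈ xs, x ∈ s) → PySem.Set.update s xs = s := by
  induction xs with
  | nil => intro s _; rfl
  | cons x xs ih =>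
      intro s h
      simp only [PySem.Set.update, List.foldl_cons]
      rw [PySem.Set.add_of_mem (h x (by simp))]
      exact ih s (fun y hy => h y (by simp [hy]))

theorem loopA_keys (ts : List Char) :
    ∀ (f : Char → Int × Int) (d : PySem.Dict Char (List Int)) (r i : Int),
    (∀ c, PySem.Dict.getD d c [-1, -1] = [(f c).1, (f c).2]) →
    ((PySem.List.enumerate ts i).foldl pvStepA (d, r)).1.keys
      = PySem.Set.update (PySem.Dict.keys d) ts := by
  induction ts with
  | nil =>
      intro f d r i h
      simp [PySem.List.enumerate, PySem.Set.update]
  | cons ch ts ih =>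
      intro f d r i h
      rw [PySem.List.enumerate_cons]
      simp only [List.foldl_cons]
      have hstep : pvStepA (d, r) (i, ch)
          = (PySem.Dict.insert d ch [(f ch).2, i],
             r + ((f ch).2 - (f ch).1) * (i - (f ch).2)) := by
        simp [pvStepA, h ch]
      rw [hstep]
      have h' : ∀ c, PySem.Dict.getD (PySem.Dict.insert d ch [(f ch).2, i]) c [-1, -1]
          = [(pfUpd f ch i c).1, (pfUpd f ch i c).2] := by
        intro c
        by_cases hc : c = ch
        · subst hc; simp [PySem.Dict.getD_insert_self, pfUpd]
        · simp [PySem.Dict.getD_insert, pfUpd, hc, h c]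
      rw [ih (pfUpd f ch i) _ _ (i + 1) h']
      have hkeys : (PySem.Dict.insert d ch [(f ch).2, i]).keys
          = PySem.Set.add (PySem.Dict.keys d) ch := by
        by_cases hc : PySem.Dict.contains d ch = true
        · rw [PySem.Dict.keys_insert_of_contains _ _ hc,
            PySem.Set.add_of_mem ((PySem.Dict.contains_iff_mem_keys d ch).1 hc)]
        · rw [PySem.Dict.keys_insert_of_not_contains _ _ (by simpa using hc),
            PySem.Set.add_of_not_mem (fun hm => hc ((PySem.Dict.contains_iff_mem_keys d ch).2 hm))]
      rw [hkeys]
      simp [PySem.Set.update]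

theorem A_decomp (s : String) :
    uniqueLetterString s
      = rdel (fun _ => (-1, -1)) s.toList 0 + ((PySem.Set.ofList s.toList).map (Wgt s.toList)).sum := by
  set cs := s.toList with hcs
  show ((PySem.Dict.items ((PySem.List.enumerate cs).foldl pvStepA
      ((PySem.Set.ofList cs).foldl (fun d c => PySem.Dict.insert d c [-1, -1])
        PySem.Dict.empty, 0)).1).foldl
    (fun r kv =>
      match kv.2 with
      | prev :: last :: _ => r + (last - prev) * ((cs.length : Int) - last)
      | _ => r)
    ((PySem.List.enumerate cs).foldl pvStepA
      ((PySem.Set.ofList cs).foldl (fun d c => PySem.Dict.insert d c [-1, -1])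
        PySem.Dict.empty, 0)).2) = _
  set index0 : PySem.Dict Char (List Int) :=
    (PySem.Set.ofList cs).foldl (fun d c => PySem.Dict.insert d c [-1, -1]) PySem.Dict.empty
    with hidx
  have hinit : ∀ c, PySem.Dict.getD index0 c [-1, -1]
      = [((fun _ => ((-1 : Int), (-1 : Int))) c).1, ((fun _ => ((-1 : Int), (-1 : Int))) c).2] := by
    intro c
    simpa using getD_init (PySem.Set.ofList cs) PySem.Dict.empty
      (fun c' => PySem.Dict.getD_empty c' _) c
  have hmain := loopA_spec cs (fun _ => (-1, -1)) index0 0 0 hinit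
  have hkeys0 : PySem.Dict.keys index0 = PySem.Set.ofList cs := by
    rw [hidx, PySem.Dict.keys_foldl_insert]
    show PySem.Set.update (PySem.Dict.keys PySem.Dict.empty) (PySem.Set.ofList cs) = _
    rw [PySem.Dict.keys_empty]
    show PySem.Set.ofList (PySem.Set.ofList cs) = _
    exact PySem.Set.ofList_ofList cs
  have hkeys : ((PySem.List.enumerate cs).foldl pvStepA (index0, 0)).1.keys
      = PySem.Set.ofList cs := by
    rw [loopA_keys cs (fun _ => (-1, -1)) index0 0 0 hinit, hkeys0]
    exact set_update_of_subset cs _ (fun x hx => (PySem.Set.mem_ofList cs x).2 hx)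
  have hitems : (PySem.Dict.items ((PySem.List.enumerate cs).foldl pvStepA (index0, 0)).1)
      = (PySem.Set.ofList cs).map (fun c => (c, [(PF cs c).1, (PF cs c).2])) := by
    rw [PySem.Dict.items_eq_map_keys _ (hkeys ▸ PySem.Set.nodup_ofList cs) [-1, -1], hkeys]
    exact List.map_congr_left (fun c _ => by rw [hmain.1 c]; rfl)
  rw [hitems, hmain.2, List.foldl_map]
  rw [show (fun (r : Int) (c : Char) =>
      (match ((fun c => (c, [(PF cs c).1, (PF cs c).2])) c).2 with
        | prev :: last :: _ => r + (last - prev) * ((cs.length : Int) - last)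
        | _ => r)) = fun r c => r + Wgt cs c from funext fun r => funext fun c => rfl]
  rw [PySem.List.foldl_add]
  ring

theorem enum_map_snd (cs : List Char) : ∀ i : Int,
    (PySem.List.enumerate cs i).map (fun p => p.2) = cs := by
  induction cs with
  | nil => intro i; rfl
  | cons x xs ih => intro i; rw [PySem.List.enumerate_cons]; simp [ih (i + 1)]

theorem set_update_nil (xs : List Char) :
    PySem.Set.update ([] : PySem.Set Char) xs = PySem.Set.ofList xs := rfl

theorem chainB_eq (n : Int) : ∀ (ps : List Int) (t prev : Int),
    ((ps.zip (ps.drop 1 ++ [n])).foldl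
      (fun tp q => (tp.1 + (q.1 - tp.2) * (q.2 - q.1), q.1)) (t, prev)).1
      = t + chain prev ps n := by
  intro ps
  induction ps with
  | nil => intro t prev; simp [chain]
  | cons p ps ih =>
      intro t prev
      cases ps with
      | nil => simp [chain]
      | cons q t' =>
          have := ih (t + (p - prev) * (q - p)) p
          simp only [List.drop_succ_cons, List.drop_zero, List.cons_append] at this ⊢
          rw [show (p :: q :: t').zip (q :: (t' ++ [n])) = (p, q) :: (q :: t').zip (t' ++ [n])
            from rfl, List.foldl_cons]
          rw [show chain prev (p :: q :: t') n = (p - prev) * (q - p) + chain p (q :: t') n from rfl, this]; ring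

theorem B_decomp (s : String) :
    uniqueLetterString_alt s
      = ((PySem.Set.ofList s.toList).map
          (fun c => chain (-1) (occ s.toList c) (s.toList.length : Int))).sum := by
  set cs := s.toList with hcs
  show ((PySem.Dict.values ((PySem.List.enumerate cs).foldl pvStepB PySem.Dict.empty)).foldl
      (fun total ps => pvChainB (cs.length : Int) total ps) 0) = _
  have hswap : (PySem.List.enumerate cs).foldl pvStepB PySem.Dict.empty
      = ((PySem.List.enumerate cs).map Prod.swap).foldl
          (fun d q => PySem.Dict.modify d q.1 [] (fun x => x ++ [q.2])) PySem.Dict.empty := by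
    rw [List.foldl_map]; rfl
  have hkeys : ((PySem.List.enumerate cs).foldl pvStepB PySem.Dict.empty).keys
      = PySem.Set.ofList cs := by
    have h := PySem.Dict.keys_foldl_modify_key (PySem.List.enumerate cs)
      (fun p : Int × Char => p.2) [] (fun _ p => fun x => x ++ [p.1]) PySem.Dict.empty
    have hshape : (PySem.List.enumerate cs).foldl pvStepB PySem.Dict.empty
        = (PySem.List.enumerate cs).foldl
            (fun d x => PySem.Dict.modify d x.2 [] (fun v => v ++ [x.1])) PySem.Dict.empty := rfl
    rw [hshape, h, PySem.Dict.keys_empty, set_update_nil, enum_map_snd cs 0]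
  have hnodup : ((PySem.List.enumerate cs).foldl pvStepB PySem.Dict.empty).keys.Nodup :=
    hkeys ▸ PySem.Set.nodup_ofList cs
  have hgetD : ∀ c, PySem.Dict.getD ((PySem.List.enumerate cs).foldl pvStepB PySem.Dict.empty) c []
      = occ cs c := by
    intro c
    rw [hswap, PySem.Dict.getD_foldl_modify_append, PySem.Dict.getD_empty]
    rfl
  have hvals : (PySem.Dict.values ((PySem.List.enumerate cs).foldl pvStepB PySem.Dict.empty))
      = (PySem.Set.ofList cs).map (fun c => occ cs c) := by
    rw [PySem.Dict.values_eq_map_keys _ hnodup [], hkeys]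
    exact List.map_congr_left (fun c _ => hgetD c)
  rw [hvals, List.foldl_map]
  rw [show (fun (total : Int) (c : Char) => pvChainB (cs.length : Int) total (occ cs c))
      = fun total c => total + chain (-1) (occ cs c) (cs.length : Int) from
    funext fun t => funext fun c => chainB_eq (cs.length : Int) (occ cs c) t (-1)]
  rw [PySem.List.foldl_add]
  ring

theorem enum_append (l : List Char) (d : Char) : ∀ i : Int,
    PySem.List.enumerate (l ++ [d]) i
      = PySem.List.enumerate l i ++ [(i + (l.length : Int), d)] := by
  induction l with
  | nil => intro i; simp [PySem.List.enumerate_cons, PySem.List.enumerate]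
  | cons x xs ih =>
      intro i
      rw [List.cons_append, PySem.List.enumerate_cons, ih (i + 1), PySem.List.enumerate_cons]
      simp only [List.cons_append, List.length_cons]
      push_cast
      ring_nf

theorem pfExt_append (l : List Char) (d : Char) : ∀ (f : Char → Int × Int) (i : Int) (c : Char),
    pfExt f (l ++ [d]) i c
      = if c = d then ((pfExt f l i d).2, i + (l.length : Int)) else pfExt f l i c := by
  induction l with
  | nil =>
      intro f i c
      simp only [List.nil_append, pfExt, pfUpd, List.length_nil]
      norm_num
  | cons x xs ih =>
      intro f i c
      simp only [List.cons_append, pfExt, List.length_cons]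
      rw [ih (pfUpd f x i) (i + 1) c]
      push_cast
      ring_nf

theorem rdel_append (l : List Char) (d : Char) : ∀ (f : Char → Int × Int) (i : Int),
    rdel f (l ++ [d]) i
      = rdel f l i + ((pfExt f l i d).2 - (pfExt f l i d).1)
          * ((i + (l.length : Int)) - (pfExt f l i d).2) := by
  induction l with
  | nil => intro f i; simp [rdel, pfExt]
  | cons x xs ih =>
      intro f i
      simp only [List.cons_append, rdel, pfExt, List.length_cons]
      rw [ih (pfUpd f x i) (i + 1)]
      push_cast
      ring_nf

theorem occ_append (l : List Char) (d : Char) (c : Char) :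
    occ (l ++ [d]) c = if c = d then occ l c ++ [(l.length : Int)] else occ l c := by
  unfold occ
  rw [enum_append l d 0]
  by_cases hc : c = d
  · subst hc
    simp [List.filter_append, Prod.swap]
  · simp [List.filter_append, Prod.swap, hc, Ne.symm hc, beq_iff_eq]

theorem pe_append (ab : Int × Int) (qs : List Int) (m : Int) :
    pe ab (qs ++ [m]) = ((pe ab qs).2, m) := by
  simp [pe, List.foldl_append]

theorem PF_pe (cs : List Char) : ∀ c, PF cs c = pe (-1, -1) (occ cs c) := by
  induction cs using List.reverseRecOn with
  | nil => intro c; rfl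
  | append_singleton l d ih =>
      intro c
      rw [show PF (l ++ [d]) c = pfExt (fun _ => (-1, -1)) (l ++ [d]) 0 c from rfl,
        pfExt_append, occ_append]
      by_cases hc : c = d
      · subst hc
        rw [if_pos rfl, if_pos rfl, pe_append,
          show pfExt (fun _ => ((-1 : Int), (-1 : Int))) l 0 c = PF l c from rfl, ih c]
        norm_num
      · simp only [if_neg hc]
        exact ih c

theorem occ_of_not_mem : ∀ (cs : List Char) (c : Char), c ∉ cs → occ cs c = [] := by
  intro cs
  induction cs using List.reverseRecOn with
  | nil => intro c _; rfl
  | append_singleton l d ih =>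
      intro c hc
      rw [occ_append, if_neg (by intro h; exact hc (by simp [h]))]
      exact ih c (fun h => hc (by simp [h]))

theorem chain_succ : ∀ (qs : List Int) (prev n : Int),
    chain prev qs (n + 1) = chain prev qs n + ((pe (prev, prev) qs).2 - (pe (prev, prev) qs).1) := by
  intro qs
  induction qs with
  | nil => intro prev n; simp [chain, pe]
  | cons p t ih =>
      intro prev n
      cases t with
      | nil => simp [chain, pe]; try ring
      | cons q t' =>
          rw [show chain prev (p :: q :: t') (n + 1)
              = (p - prev) * (q - p) + chain p (q :: t') (n + 1) from rfl,
            show chain prev (p :: q :: t') n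
              = (p - prev) * (q - p) + chain p (q :: t') n from rfl,
            ih p n,
            show pe (prev, prev) (p :: q :: t') = pe (p, p) (q :: t') from rfl,
            show pe (p, p) (q :: t') = pe (p, p) (q :: t') from rfl]
          ring

theorem chain_snoc : ∀ (qs : List Int) (prev m : Int),
    chain prev (qs ++ [m]) (m + 1) = chain prev qs m + (m - (pe (prev, prev) qs).2) := by
  intro qs
  induction qs with
  | nil => intro prev m; simp [chain, pe]; try ring
  | cons p t ih =>
      intro prev m
      cases t with
      | nil => simp [chain, pe]; try ring
      | cons q t' =>
          rw [show (p :: q :: t') ++ [m] = p :: ((q :: t') ++ [m]) from rfl,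
            show chain prev (p :: (q :: t' ++ [m])) (m + 1)
              = (p - prev) * (q - p) + chain p (q :: t' ++ [m]) (m + 1) from rfl,
            show chain prev (p :: q :: t') m
              = (p - prev) * (q - p) + chain p (q :: t') m from rfl]
          have := ih p m
          rw [show pe (prev, prev) (p :: q :: t') = pe (p, p) (q :: t') from rfl]
          rw [show (q :: t') ++ [m] = q :: (t' ++ [m]) from rfl] at this ⊢
          rw [this]
          ring

theorem sum_map_ite_single (d : Char) (x : Int) : ∀ (S : List Char), S.Nodup → d ∈ S →
    (S.map (fun c => if c = d then x else 0)).sum = x := by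
  intro S
  induction S with
  | nil => intro _ h; cases h
  | cons a S ih =>
      intro hnd hm
      simp only [List.map_cons, List.sum_cons]
      by_cases ha : a = d
      · subst ha
        rw [if_pos rfl]
        have : (S.map (fun c => if c = a then x else 0)).sum = 0 := by
          apply List.sum_eq_zero
          intro y hy
          obtain ⟨c, hc, rfl⟩ := List.mem_map.1 hy
          rw [if_neg]
          intro h; exact (List.nodup_cons.1 hnd).1 (h ▸ hc)
        rw [this]; ring
      · rw [if_neg ha, ih (List.nodup_cons.1 hnd).2
          (by cases hm with | head => exact absurd rfl ha | tail _ h => exact h)]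
        ring

theorem set_ofList_append_singleton (l : List Char) (d : Char) :
    PySem.Set.ofList (l ++ [d])
      = if d ∈ l then PySem.Set.ofList l else PySem.Set.ofList l ++ [d] := by
  rw [PySem.Set.ofList_eq_foldl, List.foldl_append, ← PySem.Set.ofList_eq_foldl]
  simp only [List.foldl_cons, List.foldl_nil]
  by_cases hd : d ∈ l
  · rw [if_pos hd]
    exact PySem.Set.add_of_mem ((PySem.Set.mem_ofList l d).2 hd)
  · rw [if_neg hd]
    exact PySem.Set.add_of_not_mem (fun h => hd ((PySem.Set.mem_ofList l d).1 h))

theorem PF_append (l : List Char) (d c : Char) :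
    PF (l ++ [d]) c = if c = d then ((PF l d).2, (l.length : Int)) else PF l c := by
  rw [show PF (l ++ [d]) c = pfExt (fun _ => (-1, -1)) (l ++ [d]) 0 c from rfl, pfExt_append]
  by_cases hcd : c = d
  · rw [if_pos hcd, if_pos hcd]
    norm_num
    rfl
  · rw [if_neg hcd, if_neg hcd]
    rfl

theorem grand (cs : List Char) :
    rdel (fun _ => (-1, -1)) cs 0 + ((PySem.Set.ofList cs).map (Wgt cs)).sum
      = ((PySem.Set.ofList cs).map (fun c => chain (-1) (occ cs c) (cs.length : Int))).sum := by
  induction cs using List.reverseRecOn with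
  | nil => rfl
  | append_singleton l d ih =>
      have hlen : (((l ++ [d]).length : Nat) : Int) = (l.length : Int) + 1 := by
        simp
      have hrdel : rdel (fun _ => (-1, -1)) (l ++ [d]) 0
          = rdel (fun _ => (-1, -1)) l 0
            + ((PF l d).2 - (PF l d).1) * ((l.length : Int) - (PF l d).2) := by
        rw [rdel_append, show pfExt (fun _ => ((-1 : Int), (-1 : Int))) l 0 d = PF l d from rfl]
        ring_nf
      have hW : ∀ c ∈ PySem.Set.ofList l, Wgt (l ++ [d]) c
          = (Wgt l c + ((PF l c).2 - (PF l c).1))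
            + (if c = d then ((l.length : Int) - (PF l d).2) - Wgt l d
                - ((PF l d).2 - (PF l d).1) else 0) := by
        intro c _
        unfold Wgt
        rw [PF_append, hlen]
        by_cases hcd : c = d
        · subst hcd
          rw [if_pos rfl, if_pos rfl]
          dsimp only
          ring
        · rw [if_neg hcd, if_neg hcd]
          ring
      have hC : ∀ c ∈ PySem.Set.ofList l,
          chain (-1) (occ (l ++ [d]) c) ((l.length : Int) + 1)
          = (chain (-1) (occ l c) (l.length : Int) + ((PF l c).2 - (PF l c).1))
            + (if c = d then ((l.length : Int) - (PF l d).2)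
                - ((PF l d).2 - (PF l d).1) else 0) := by
        intro c _
        rw [occ_append]
        by_cases hcd : c = d
        · subst hcd
          rw [if_pos rfl, if_pos rfl, chain_snoc, ← PF_pe l c]
          ring
        · rw [if_neg hcd, if_neg hcd, chain_succ, ← PF_pe l c]
          ring
      rw [set_ofList_append_singleton]
      have hlam : (fun c => chain (-1) (occ (l ++ [d]) c) (((l ++ [d]).length : Nat) : Int))
          = fun c => chain (-1) (occ (l ++ [d]) c) ((l.length : Int) + 1) := by
        rw [hlen]
      have hWd_eq : Wgt l d
          = ((PF l d).2 - (PF l d).1) * ((l.length : Int) - (PF l d).2) := rfl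
      by_cases hd : d ∈ l
      · rw [if_pos hd]
        have hdS : d ∈ PySem.Set.ofList l := (PySem.Set.mem_ofList l d).2 hd
        have hWsum : ((PySem.Set.ofList l).map (Wgt (l ++ [d]))).sum
            = ((PySem.Set.ofList l).map (Wgt l)).sum
              + ((PySem.Set.ofList l).map (fun c => (PF l c).2 - (PF l c).1)).sum
              + (((l.length : Int) - (PF l d).2) - Wgt l d - ((PF l d).2 - (PF l d).1)) := by
          rw [List.map_congr_left hW,
            PySem.List.sum_map_add_int _ (fun c => Wgt l c + ((PF l c).2 - (PF l c).1))
              (fun c => if c = d then ((l.length : Int) - (PF l d).2) - Wgt l d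
                - ((PF l d).2 - (PF l d).1) else 0),
            PySem.List.sum_map_add_int _ (Wgt l) (fun c => (PF l c).2 - (PF l c).1),
            sum_map_ite_single d _ _ (PySem.Set.nodup_ofList l) hdS]
        have hCsum : ((PySem.Set.ofList l).map
              (fun c => chain (-1) (occ (l ++ [d]) c) (((l ++ [d]).length : Nat) : Int))).sum
            = ((PySem.Set.ofList l).map (fun c => chain (-1) (occ l c) (l.length : Int))).sum
              + ((PySem.Set.ofList l).map (fun c => (PF l c).2 - (PF l c).1)).sum
              + (((l.length : Int) - (PF l d).2) - ((PF l d).2 - (PF l d).1)) := by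
          rw [hlam, List.map_congr_left hC,
            PySem.List.sum_map_add_int _
              (fun c => chain (-1) (occ l c) (l.length : Int) + ((PF l c).2 - (PF l c).1))
              (fun c => if c = d then ((l.length : Int) - (PF l d).2)
                - ((PF l d).2 - (PF l d).1) else 0),
            PySem.List.sum_map_add_int _ (fun c => chain (-1) (occ l c) (l.length : Int))
              (fun c => (PF l c).2 - (PF l c).1),
            sum_map_ite_single d _ _ (PySem.Set.nodup_ofList l) hdS]
        rw [hrdel, hWsum, hCsum]
        linarith [ih, hWd_eq]
      · rw [if_neg hd]
        have hPFd : PF l d = (-1, -1) := by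
          rw [PF_pe l d, occ_of_not_mem l d hd]; rfl
        have hoccd : occ l d = [] := occ_of_not_mem l d hd
        have hW' : ∀ c ∈ PySem.Set.ofList l, Wgt (l ++ [d]) c
            = Wgt l c + ((PF l c).2 - (PF l c).1) := by
          intro c hc
          have hcd : c ≠ d := fun h => hd (h ▸ (PySem.Set.mem_ofList l c).1 hc)
          rw [hW c hc, if_neg hcd]
          ring
        have hC' : ∀ c ∈ PySem.Set.ofList l,
            chain (-1) (occ (l ++ [d]) c) ((l.length : Int) + 1)
            = chain (-1) (occ l c) (l.length : Int) + ((PF l c).2 - (PF l c).1) := by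
          intro c hc
          have hcd : c ≠ d := fun h => hd (h ▸ (PySem.Set.mem_ofList l c).1 hc)
          rw [hC c hc, if_neg hcd]
          ring
        have hWsum : ((PySem.Set.ofList l).map (Wgt (l ++ [d]))).sum
            = ((PySem.Set.ofList l).map (Wgt l)).sum
              + ((PySem.Set.ofList l).map (fun c => (PF l c).2 - (PF l c).1)).sum := by
          rw [List.map_congr_left hW',
            PySem.List.sum_map_add_int _ (Wgt l) (fun c => (PF l c).2 - (PF l c).1)]
        have hCsum : ((PySem.Set.ofList l).map
              (fun c => chain (-1) (occ (l ++ [d]) c) (((l ++ [d]).length : Nat) : Int))).sum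
            = ((PySem.Set.ofList l).map (fun c => chain (-1) (occ l c) (l.length : Int))).sum
              + ((PySem.Set.ofList l).map (fun c => (PF l c).2 - (PF l c).1)).sum := by
          rw [hlam, List.map_congr_left hC',
            PySem.List.sum_map_add_int _ (fun c => chain (-1) (occ l c) (l.length : Int))
              (fun c => (PF l c).2 - (PF l c).1)]
        have hWd : Wgt (l ++ [d]) d = (l.length : Int) + 1 := by
          unfold Wgt
          rw [PF_append, if_pos rfl, hlen, hPFd]
          ring
        have hCd : chain (-1) (occ (l ++ [d]) d) (((l ++ [d]).length : Nat) : Int)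
            = (l.length : Int) + 1 := by
          rw [hlen, occ_append, if_pos rfl, hoccd, List.nil_append]
          simp [chain]
        rw [List.map_append, List.map_append, List.sum_append, List.sum_append,
          hWsum, hCsum, hrdel, hPFd]
        simp only [List.map_cons, List.map_nil, List.sum_cons, List.sum_nil, hWd, hCd]
        linarith [ih]

-- ===== VERDICT (by name: the statement is the Claim_ definition above) =====
theorem uniqueLetterString_spec : Claim_equal_uniqueLetterString := by
  intro s _
  unfold Spec_uniqueLetterString
  exact (A_decomp s).trans ((grand s.toList).trans (B_decomp s).symm)
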